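-- pv_equiv track=rewrite | github.com/papampi/braiins-os | miner/packages.py | _get_package_record
-- ===== SOURCE A (Python) =====
-- from collections import OrderedDict
--
-- def _get_package_record(stream):
--     """
--
--     :param stream:
--     :return:
--     """
--     package = OrderedDict()
--     attribute = None
--     value = None
--     for line in stream:
--         if not len(line) or line[0] == '\n':
--             # end of record
--             break
--         if not line[0].isspace():
--             # found new package attribute
--             if attribute:
--                 # store previous attribute
--                 package[attribute] = value
--             # attribute has format 'name: value\n'
--             attribute, value = line.split(': ', 1)
--             # remove newline
--             value = value.rstrip()
--         else:
--             # when newline starts with space then previous attribute value continues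
--             value = '{}\n{}'.format(value, line.rstrip())
--     if attribute:
--         # store previous attribute
--         package[attribute] = value
--     return package
-- ===== SOURCE B (Python) =====
-- from collections import OrderedDict
--
-- def _get_package_record(stream):
--     """
--
--     :param stream:
--     :return:
--     """
--     # pass 1: collect the record's lines, stopping at the break sentinel
--     record = []
--     for line in stream:
--         if not len(line) or line[0] == '\n':
--             break
--         record.append(line)
--     # pass 2: group lines into attribute -> list of parts (first position, last value)
--     parts = OrderedDict()
--     current = None
--     for line in record:
--         if not line[0].isspace():
--             attribute, value = line.split(': ', 1)
--             parts[attribute] = [value.rstrip()]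
--             current = attribute
--         elif current is not None:
--             parts[current].append(line.rstrip())
--     # pass 3: join each attribute's parts; an unnamed attribute (from a malformed ': ...' line)
--     # is never stored, like A's truthiness check
--     return OrderedDict((a, '\n'.join(p)) for a, p in parts.items() if a)
-- ===== Notes on version B (the rewrite author's own statement) =====
-- stated objective: alternative
-- what changed: B replaces A's single flush-on-next-attribute loop carrying (package, attribute, value) by a three-phase pipeline: collect the record's lines up to the break sentinel, group them into an ordered attribute -> list-of-parts map, then join each part list with newlines (dropping the unnamed pseudo-attribute, as A's truthiness check does).
import Mathlib
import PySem

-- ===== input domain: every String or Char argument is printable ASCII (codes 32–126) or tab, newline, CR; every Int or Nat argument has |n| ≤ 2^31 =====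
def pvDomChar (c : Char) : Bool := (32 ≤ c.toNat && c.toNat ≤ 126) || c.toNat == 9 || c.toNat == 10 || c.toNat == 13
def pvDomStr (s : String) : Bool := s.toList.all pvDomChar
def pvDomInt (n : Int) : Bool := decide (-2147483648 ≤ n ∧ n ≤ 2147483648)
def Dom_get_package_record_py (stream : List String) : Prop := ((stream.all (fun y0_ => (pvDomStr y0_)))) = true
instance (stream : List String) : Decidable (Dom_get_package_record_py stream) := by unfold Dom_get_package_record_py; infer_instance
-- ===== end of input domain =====

-- B replaces A's single flush-on-next-attribute loop by a three-phase pipeline (collect record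
-- lines, group into an ordered attribute -> parts map, join parts); same cost, different structure.


-- ===== PORT A =====
-- '{}'.format(value) on the Option-valued `value` (prints "None" for None; the None case is never stored)
def pvFmtOpt (v : Option (List Char)) : List Char :=
  match v with
  | some s => s
  | none => "None".toList

-- 'if attribute: package[attribute] = value'  (attribute truthy = set and nonempty; value is a string whenever attribute is)
def pvStoreA (pkg : PySem.Dict (List Char) (List Char)) (attr : Option (List Char))
    (val : Option (List Char)) : PySem.Dict (List Char) (List Char) :=
  match attr with
  | some a => if !a.isEmpty then pkg.insert a (pvFmtOpt val) else pkg
  | none => pkg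

-- A's loop over the stream, carrying (package, attribute, value); the final store is inlined at the break/end
def pvGoA (stream : List (List Char)) (pkg : PySem.Dict (List Char) (List Char))
    (attr val : Option (List Char)) : PySem.Dict (List Char) (List Char) :=
  match stream with
  | [] => pvStoreA pkg attr val
  | line :: rest =>
    match line with
    | [] => pvStoreA pkg attr val                    -- not len(line): break
    | c :: _ =>
      if c = '\n' then pvStoreA pkg attr val         -- line[0] == '\n': break
      else if !(PySem.Chars.isspace c) then
        -- store previous attribute, then 'attribute, value = line.split(': ', 1)'
        match PySem.Chars.splitOnMax line [':', ' '] 1 with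
        | [a, v] => pvGoA rest (pvStoreA pkg attr val) (some a) (some (PySem.Chars.rstrip v))
        | _ => pvStoreA pkg attr val                 -- ValueError (unpacking); excluded by Pre_
      else
        pvGoA rest pkg attr (some (pvFmtOpt val ++ '\n' :: PySem.Chars.rstrip line))

def get_package_record_py (stream : List String) : List (String × String) :=
  (pvGoA (stream.map String.toList) PySem.Dict.empty none none).items.map
    (fun kv => (String.mk kv.1, String.mk kv.2))

-- ===== PORT B =====
-- pass 1: collect the record's lines, stopping at the break sentinel
def pvCollectB : List (List Char) → List (List Char)
  | [] => []
  | line :: rest =>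
    match line with
    | [] => []
    | c :: cs => if c = '\n' then [] else (c :: cs) :: pvCollectB rest

-- pass 2 body: group a line into (parts : attribute -> list of parts, current attribute)
def pvGroupB (st : PySem.Dict (List Char) (List (List Char)) × Option (List Char))
    (line : List Char) : PySem.Dict (List Char) (List (List Char)) × Option (List Char) :=
  match line with
  | [] => st                                          -- unreachable: collected lines are nonempty
  | c :: _ =>
    if !(PySem.Chars.isspace c) then
      match PySem.Chars.splitOnMax line [':', ' '] 1 with
      | [a, v] => (st.1.insert a [PySem.Chars.rstrip v], some a)
      | _ => st                                       -- ValueError (unpacking); excluded by Pre_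
    else
      match st.2 with
      | some cur => (st.1.modify cur [] (· ++ [PySem.Chars.rstrip line]), st.2)
      | none => st

def get_package_record_py_alt (stream : List String) : List (String × String) :=
  let record := pvCollectB (stream.map String.toList)
  let parts := (record.foldl pvGroupB (PySem.Dict.empty, none)).1
  -- pass 3: join; an unnamed attribute (from a malformed ': ...' line) is never kept
  (parts.items.filter (fun kv => !kv.1.isEmpty)).map
    (fun kv => (String.mk kv.1, String.mk (PySem.Chars.join ['\n'] kv.2)))

-- ===== PRECONDITION & SPEC =====
def pvBreakLine (l : String) : Bool :=
  match l.toList with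
  | [] => true
  | c :: _ => c == '\n'

-- a record line is fine if it is a continuation line, or 'line.split(': ', 1)' yields two pieces
def pvOkLine (l : String) : Bool :=
  match l.toList with
  | [] => true
  | c :: _ =>
    PySem.Chars.isspace c ||
      (match PySem.Chars.splitOnMax l.toList [':', ' '] 1 with
       | [_, _] => true
       | _ => false)

-- Pre_ excludes exactly the inputs with a record attribute line not containing ': ',
-- on which A's tuple unpacking of line.split(': ', 1) raises ValueError (as does B's).
def Pre_get_package_record_py (stream : List String) : Prop :=
  (stream.takeWhile (fun l => !pvBreakLine l)).all pvOkLine = true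
instance (stream : List String) : Decidable (Pre_get_package_record_py stream) := by
  unfold Pre_get_package_record_py; infer_instance

def pvWitness_get_package_record_py : List String :=
  ["Package: foo", " continued line", "Version: 1.2", "", "ignored"]

def Spec_get_package_record_py (stream : List String) (out : List (String × String)) : Prop :=
  out = get_package_record_py_alt stream
instance (stream : List String) (out : List (String × String)) :
    Decidable (Spec_get_package_record_py stream out) := by
  unfold Spec_get_package_record_py; infer_instance

-- ===== CLAIM (what is proved, stated in full; the proofs are below) =====
def Claim_equal_get_package_record_py : Prop :=
  ∀ (stream : List String), Dom_get_package_record_py stream →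
    Pre_get_package_record_py stream →
    Spec_get_package_record_py stream (get_package_record_py stream)

-- ===== LEMMAS AND PROOFS =====
-- B's pass 3 applied to the grouping dict: drop the unnamed attribute, join each parts list
def pvMapJoin (d : PySem.Dict (List Char) (List (List Char))) : PySem.Dict (List Char) (List Char) :=
  PySem.Dict.mk ((d.items.filter (fun kv => !kv.1.isEmpty)).map
    (fun kv => (kv.1, PySem.Chars.join ['\n'] kv.2)))

lemma pvContains_mapJoin (d : PySem.Dict (List Char) (List (List Char))) (k : List Char)
    (hk : k ≠ []) : (pvMapJoin d).contains k = d.contains k := by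
  rw [PySem.Dict.contains_eq_decide_mem_keys, PySem.Dict.contains_eq_decide_mem_keys]
  congr 1
  show (k ∈ ((d.items.filter _).map _).map _) = (k ∈ d.items.map _)
  simp only [List.map_map, List.mem_map, List.mem_filter, Function.comp]
  refine propext ⟨fun ⟨kv, ⟨hm, _⟩, h1⟩ => ⟨kv, hm, h1⟩, fun ⟨kv, hm, h1⟩ => ⟨kv, ⟨hm, ?_⟩, h1⟩⟩
  simp only [← h1] at hk
  simpa [List.isEmpty_iff] using hk

lemma pvMapJoin_insert (d : PySem.Dict (List Char) (List (List Char))) (k : List Char)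
    (p : List (List Char)) (hk : k ≠ []) :
    pvMapJoin (d.insert k p) = (pvMapJoin d).insert k (PySem.Chars.join ['\n'] p) := by
  have hkq : (!k.isEmpty) = true := by simpa [List.isEmpty_iff] using hk
  apply PySem.Dict.ext
  show (((d.insert k p).items.filter _).map _) = _
  rw [PySem.Dict.items_insert, PySem.Dict.items_insert, pvContains_mapJoin d k hk]
  by_cases h : d.contains k = true
  · simp only [h, if_true, List.filter_map, List.map_map]
    rw [List.filter_congr (q := fun kv => !kv.1.isEmpty) ?_]
    · show _ = ((d.items.filter _).map _).map _
      rw [List.map_map]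
      apply List.map_congr_left
      intro q hq
      by_cases hq1 : q.1 = k
      · simp [Function.comp, hq1]
      · simp [Function.comp, hq1]
    · intro q _
      by_cases hq1 : q.1 = k
      · simp [Function.comp, hq1]
      · simp [Function.comp, hq1]
  · rw [Bool.not_eq_true] at h
    simp only [h, Bool.false_eq_true, if_false, List.filter_append, List.map_append]
    simp [pvMapJoin, hkq]

lemma pvMapJoin_insert_empty (d : PySem.Dict (List Char) (List (List Char)))
    (p : List (List Char)) : pvMapJoin (d.insert [] p) = pvMapJoin d := by
  apply PySem.Dict.ext
  show (((d.insert [] p).items.filter _).map _) = ((d.items.filter _).map _)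
  rw [PySem.Dict.items_insert]
  by_cases h : d.contains [] = true
  · simp only [h, if_true, List.filter_map]
    congr 1
    rw [List.filter_congr (q := fun kv => !kv.1.isEmpty) ?_]
    · conv_rhs => rw [← List.map_id (List.filter (fun kv => !kv.1.isEmpty) d.items)]
      apply List.map_congr_left
      intro q hq
      have : ¬ q.1 = [] := by
        rcases List.mem_filter.mp hq with ⟨-, hq2⟩
        simpa [List.isEmpty_iff] using hq2
      simp [this]
    · intro q _
      by_cases hq1 : q.1 = []
      · simp [hq1]
      · simp [hq1]
  · rw [Bool.not_eq_true] at h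
    simp [h, List.filter_append]

lemma pvJoin_append_singleton (ps : List (List Char)) (r : List Char) (h : ps ≠ []) :
    PySem.Chars.join ['\n'] (ps ++ [r]) = PySem.Chars.join ['\n'] ps ++ '\n' :: r := by
  induction ps with
  | nil => exact absurd rfl h
  | cons p ps ih =>
    cases ps with
    | nil =>
      simp [PySem.Chars.join_cons_cons, PySem.Chars.join_singleton]
    | cons q ps' =>
      have := ih (by simp)
      simp only [List.cons_append, PySem.Chars.join_cons_cons] at this ⊢
      simp [this]

-- the invariant linking A's carried state to B's grouping state
def pvInv (pkg : PySem.Dict (List Char) (List Char)) (attr val : Option (List Char))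
    (parts : PySem.Dict (List Char) (List (List Char))) (cur : Option (List Char)) : Prop :=
  parts.keys.Nodup ∧
  ((attr = none ∧ cur = none ∧ pkg = PySem.Dict.empty ∧ parts = PySem.Dict.empty) ∨
   (attr = some [] ∧ cur = some [] ∧ pkg = pvMapJoin parts) ∨
   (∃ a v ps, attr = some a ∧ a ≠ [] ∧ val = some v ∧ cur = some a ∧
      parts.get? a = some ps ∧ ps ≠ [] ∧ PySem.Chars.join ['\n'] ps = v ∧
      pkg.insert a v = pvMapJoin parts))

lemma pvStoreA_eq_mapJoin (pkg : PySem.Dict (List Char) (List Char))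
    (attr val : Option (List Char)) (parts : PySem.Dict (List Char) (List (List Char)))
    (cur : Option (List Char)) (hInv : pvInv pkg attr val parts cur) :
    pvStoreA pkg attr val = pvMapJoin parts := by
  rcases hInv with ⟨-, hcase | hcase | hcase⟩
  · obtain ⟨ha, -, hp, hq⟩ := hcase
    subst ha hp hq
    rfl
  · obtain ⟨ha, -, hp⟩ := hcase
    subst ha hp
    rfl
  · obtain ⟨a, v, ps, ha, hane, hv, -, -, -, -, heq⟩ := hcase
    subst ha hv
    have : a.isEmpty = false := by simpa [List.isEmpty_iff] using hane
    simp [pvStoreA, this, pvFmtOpt, heq]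

lemma pvMain (rec : List (List Char))
    (hnb : ∀ l ∈ rec, ∃ c cs, l = c :: cs ∧ c ≠ '\n')
    (hok : ∀ l ∈ rec, ∀ c cs, l = c :: cs → PySem.Chars.isspace c = false →
      ∃ a v, PySem.Chars.splitOnMax l [':', ' '] 1 = [a, v]) :
    ∀ pkg attr val parts cur, pvInv pkg attr val parts cur →
      pvGoA rec pkg attr val = pvMapJoin (rec.foldl pvGroupB (parts, cur)).1 := by
  induction rec with
  | nil =>
    intro pkg attr val parts cur hInv
    exact pvStoreA_eq_mapJoin pkg attr val parts cur hInv
  | cons line rest ih =>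
    intro pkg attr val parts cur hInv
    obtain ⟨c, cs, rfl, hcne⟩ := hnb _ (List.mem_cons_self ..)
    have hnb' : ∀ l ∈ rest, ∃ c cs, l = c :: cs ∧ c ≠ '\n' :=
      fun l hl => hnb l (List.mem_cons_of_mem _ hl)
    have hok' : ∀ l ∈ rest, ∀ c cs, l = c :: cs → PySem.Chars.isspace c = false →
        ∃ a v, PySem.Chars.splitOnMax l [':', ' '] 1 = [a, v] :=
      fun l hl => hok l (List.mem_cons_of_mem _ hl)
    by_cases hsp : PySem.Chars.isspace c = true
    · -- continuation line
      simp only [pvGoA, List.foldl_cons, pvGroupB, hsp, if_neg hcne, Bool.not_true,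
        Bool.false_eq_true, if_false]
      rcases hInv with ⟨hnd, hcase | hcase | hcase⟩
      · -- no attribute yet: B leaves its state alone, A only rewrites `value`
        obtain ⟨ha, hc, hp, hq⟩ := hcase
        subst hc
        exact ih hnb' hok' _ _ _ _ _ ⟨hnd, Or.inl ⟨ha, rfl, hp, hq⟩⟩
      · -- unnamed attribute: B appends under the dropped key [] — invisible after pass 3
        obtain ⟨ha, hc, hp⟩ := hcase
        subst ha hc
        show pvGoA rest pkg (some []) _ = pvMapJoin (List.foldl pvGroupB
          (parts.modify [] [] fun x => x ++ [PySem.Chars.rstrip (c :: cs)], some []) rest).1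
        apply ih hnb' hok'
        refine ⟨PySem.Dict.nodup_keys_insert _ _ _ hnd, Or.inr (Or.inl ⟨rfl, rfl, ?_⟩)⟩
        show pkg = pvMapJoin (parts.insert [] _)
        rw [pvMapJoin_insert_empty, hp]
      · obtain ⟨a, v, ps, ha, hane, hv, hc, hget, hpne, hjoin, heq⟩ := hcase
        subst ha hv hc
        have hmod : parts.modify a [] (· ++ [PySem.Chars.rstrip (c :: cs)]) =
            parts.insert a (ps ++ [PySem.Chars.rstrip (c :: cs)]) := by
          show parts.insert a ((parts.getD a []) ++ _) = _
          rw [PySem.Dict.getD_of_get?_eq_some parts [] hget]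
        show pvGoA rest pkg (some a) _ = pvMapJoin (List.foldl pvGroupB
          (parts.modify a [] fun x => x ++ [PySem.Chars.rstrip (c :: cs)], some a) rest).1
        rw [hmod]
        apply ih hnb' hok'
        refine ⟨PySem.Dict.nodup_keys_insert _ _ _ hnd,
          Or.inr (Or.inr ⟨a, v ++ '\n' :: PySem.Chars.rstrip (c :: cs),
            ps ++ [PySem.Chars.rstrip (c :: cs)], rfl, hane, by simp [pvFmtOpt], rfl,
            PySem.Dict.get?_insert_self .., by simp, ?_, ?_⟩)⟩
        · rw [pvJoin_append_singleton ps _ hpne, hjoin]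
        · rw [pvMapJoin_insert _ _ _ hane, pvJoin_append_singleton ps _ hpne, hjoin, ← heq,
            PySem.Dict.insert_insert_self]
    · -- new attribute line
      have hsp' : PySem.Chars.isspace c = false := by simpa using hsp
      obtain ⟨a', v', hsplit⟩ := hok _ (List.mem_cons_self ..) c cs rfl hsp'
      have hnd := hInv.1
      have hstore := pvStoreA_eq_mapJoin pkg attr val parts cur hInv
      simp only [pvGoA, List.foldl_cons, pvGroupB, hsp', if_neg hcne, Bool.not_false,
        if_true, hsplit]
      apply ih hnb' hok'
      by_cases ha' : a' = []
      · -- unnamed attribute: A will never store it, B's pass 3 drops it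
        subst ha'
        refine ⟨PySem.Dict.nodup_keys_insert _ _ _ hnd, Or.inr (Or.inl ⟨rfl, rfl, ?_⟩)⟩
        rw [pvMapJoin_insert_empty, ← hstore]
      · refine ⟨PySem.Dict.nodup_keys_insert _ _ _ hnd,
          Or.inr (Or.inr ⟨a', PySem.Chars.rstrip v', [PySem.Chars.rstrip v'], rfl, ha', rfl, rfl,
            PySem.Dict.get?_insert_self .., by simp, PySem.Chars.join_singleton .., ?_⟩)⟩
        rw [pvMapJoin_insert _ _ _ ha', PySem.Chars.join_singleton, hstore]

lemma pvGoA_collect (stream : List (List Char)) (pkg : PySem.Dict (List Char) (List Char))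
    (attr val : Option (List Char)) :
    pvGoA stream pkg attr val = pvGoA (pvCollectB stream) pkg attr val := by
  induction stream generalizing pkg attr val with
  | nil => rfl
  | cons line rest ih =>
    cases line with
    | nil => rfl
    | cons c cs =>
      by_cases hc : c = '\n'
      · simp [pvGoA, pvCollectB, hc]
      · by_cases hsp : PySem.Chars.isspace c = true
        · simp only [pvGoA, pvCollectB, if_neg hc, hsp, Bool.not_true, Bool.false_eq_true,
            if_false]
          exact ih ..
        · have hsp' : PySem.Chars.isspace c = false := by simpa using hsp
          simp only [pvGoA, pvCollectB, if_neg hc, hsp', Bool.not_false, if_true]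
          cases hs : PySem.Chars.splitOnMax (c :: cs) [':', ' '] 1 with
          | nil => rfl
          | cons x xs =>
            cases xs with
            | nil => rfl
            | cons y ys =>
              cases ys with
              | nil => exact ih ..
              | cons z zs => rfl

lemma pvCollectB_eq_takeWhile (stream : List String) :
    pvCollectB (stream.map String.toList) =
      (stream.takeWhile (fun l => !pvBreakLine l)).map String.toList := by
  induction stream with
  | nil => rfl
  | cons l rest ih =>
    simp only [List.map_cons, List.takeWhile_cons]
    cases h : l.toList with
    | nil => simp [pvCollectB, pvBreakLine, h]
    | cons c cs =>
      by_cases hc : c = '\n'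
      · simp [pvCollectB, pvBreakLine, h, hc]
      · simp [pvCollectB, pvBreakLine, h, hc, ih]

lemma pvCollectB_nonbreak (stream : List (List Char)) :
    ∀ l ∈ pvCollectB stream, ∃ c cs, l = c :: cs ∧ c ≠ '\n' := by
  induction stream with
  | nil => intro l hl; simp [pvCollectB] at hl
  | cons line rest ih =>
    intro l hl
    cases line with
    | nil => simp [pvCollectB] at hl
    | cons c cs =>
      by_cases hc : c = '\n'
      · simp [pvCollectB, hc] at hl
      · simp only [pvCollectB, if_neg hc, List.mem_cons] at hl
        rcases hl with rfl | hl
        · exact ⟨c, cs, rfl, hc⟩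
        · exact ih l hl

-- ===== VERDICT (by name: the statement is the Claim_ definition above) =====
theorem get_package_record_py_spec : Claim_equal_get_package_record_py := by
  intro stream _ hpre
  unfold Spec_get_package_record_py get_package_record_py get_package_record_py_alt
  rw [pvGoA_collect]
  have hrec := pvCollectB_eq_takeWhile stream
  have hnb := pvCollectB_nonbreak (stream.map String.toList)
  have hok : ∀ l ∈ pvCollectB (stream.map String.toList), ∀ c cs, l = c :: cs →
      PySem.Chars.isspace c = false →
      ∃ a v, PySem.Chars.splitOnMax l [':', ' '] 1 = [a, v] := by
    intro l hl c cs hcs hsp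
    rw [hrec] at hl
    obtain ⟨s, hs, rfl⟩ := List.mem_map.mp hl
    have hall := List.all_eq_true.mp hpre s hs
    unfold pvOkLine at hall
    rw [hcs] at hall ⊢
    simp only [hsp] at hall
    cases h : PySem.Chars.splitOnMax (c :: cs) [':', ' '] 1 with
    | nil => rw [h] at hall; simp at hall
    | cons x xs =>
      cases xs with
      | nil => rw [h] at hall; simp at hall
      | cons y ys =>
        cases ys with
        | nil => exact ⟨x, y, rfl⟩
        | cons z zs => rw [h] at hall; simp at hall
  rw [pvMain (pvCollectB (stream.map String.toList)) hnb hok PySem.Dict.empty none none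
    PySem.Dict.empty none ⟨PySem.Dict.nodup_keys_empty, Or.inl ⟨rfl, rfl, rfl, rfl⟩⟩]
  show ((List.foldl pvGroupB (PySem.Dict.empty, none)
      (pvCollectB (List.map String.toList stream))).1.items.filter _ |>.map _).map _ = _
  rw [List.map_map]
  rfl
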